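-- pv_equiv track=rewrite | github.com/klapperking/aoc2025 | day07/solution.py | get_n_splits
-- ===== SOURCE A (Python) =====
-- from collections import deque
--
-- def get_start_pos(rows: list[list[str]]) -> tuple[int, int] | None:
--     for row_idx in range(0, len(rows)):
--         for col_idx in range(0, len(rows[0])):
--             if rows[row_idx][col_idx] == "S":
--                 return (row_idx + 1, col_idx)
--
--     return None
--
-- def get_n_splits(rows: list[list[str]]) -> int:
--     result = 0
--
--     checked: set[tuple[int, int]] = set()
--     queued: deque[tuple[int, int]] = deque()
--
--     start = get_start_pos(rows)
--     if start is None: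
--         raise ValueError("Start positiion not found, input invalid")
--     queued.append(start)
--
--     while len(queued) > 0:
--         check = queued.popleft()
--
--         if check in checked:
--             continue
--
--         checked.add(check)
--
--         y, x = check[0], check[1]
--
--         grid_value = rows[y][x]
--
--         new_positions: list[tuple[int, int]] = []
--
--         if grid_value == ".":
--             new_positions = [(y + 1, x)]
--         elif grid_value == "^":
--             new_positions = [(y + 1, x - 1), (y + 1, x + 1)]
--             result += 1
--
--         for pos in new_positions:
--             if (
--                 pos[0] < 0
--                 or pos[0] >= len(rows)
--                 or pos[1] < 0
--                 or pos[1] >= len(rows[0])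
--             ):
--                 continue
--
--             if pos not in checked:
--                 queued.append(pos)
--
--     return result
-- ===== SOURCE B (Python) =====
-- def get_n_splits(rows: list[list[str]]) -> int:
--     start_row, start_col = None, None
--     for r, row in enumerate(rows):
--         if "S" in row:
--             start_row, start_col = r + 1, row.index("S")
--             break
--     if start_row is None:
--         raise ValueError("Start positiion not found, input invalid")
--
--     width = len(rows[0])
--     count = 0
--     frontier = {start_col}
--     for row in rows[start_row:]:
--         nxt = set()
--         for x in frontier:
--             c = row[x]
--             if c == "^":
--                 count += 1
--                 nxt.add(x - 1)
--                 nxt.add(x + 1)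
--             elif c == ".":
--                 nxt.add(x)
--         frontier = {x for x in nxt if 0 <= x < width}
--     return count
-- ===== Notes on version B (the rewrite author's own statement) =====
-- stated objective: simpler
-- what changed: Replaces the FIFO queue + global visited-set BFS with a top-to-bottom row sweep that keeps only a set of active columns per row (every move goes down exactly one row), accumulating the splitter count per row.
-- outside the precondition, e.g. on get_n_splits([['S'], ['^'], []]): A returns 1, B returns 1
import Mathlib
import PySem

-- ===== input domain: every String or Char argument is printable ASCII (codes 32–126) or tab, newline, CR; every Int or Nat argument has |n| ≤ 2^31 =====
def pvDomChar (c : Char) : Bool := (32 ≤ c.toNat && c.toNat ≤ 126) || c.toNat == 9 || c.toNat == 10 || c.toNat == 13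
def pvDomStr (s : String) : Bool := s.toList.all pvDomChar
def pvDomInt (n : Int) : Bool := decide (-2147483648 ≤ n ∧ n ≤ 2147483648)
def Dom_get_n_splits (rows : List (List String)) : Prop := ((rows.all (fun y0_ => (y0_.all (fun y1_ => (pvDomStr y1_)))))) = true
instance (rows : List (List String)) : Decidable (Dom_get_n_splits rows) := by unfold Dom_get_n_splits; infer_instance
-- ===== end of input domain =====

-- B replaces A's FIFO-queue BFS by a per-row sweep over a set of active columns ('simpler');
-- equivalence is proved on rectangular grids whose first 'S' is not in the bottom row (A raises outside that, see Pre_).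

-- ===== PORT A =====
-- nested for loops with early return, ported as findSome? over the same ranges;
-- rows[0] is written rows.headD [] (only evaluated when rows ≠ [], as in Python)
def get_start_pos (rows : List (List String)) : Option (Int × Int) :=
  (PySem.List.pyRange 0 rows.length 1).findSome? (fun row_idx =>
    (PySem.List.pyRange 0 (rows.headD []).length 1).findSome? (fun col_idx =>
      if PySem.List.pyGet? ((PySem.List.pyGet? rows row_idx).getD []) col_idx = some "S"
      then some (row_idx + 1, col_idx) else none))

-- fuel bound for the while loop (proved sufficient under Pre_); each iteration pops one queue entry
def pvFuelA (rows : List (List String)) : Nat := 2 ^ (rows.length + 2)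

-- the while loop; queue popleft = head, append = ++ [·]; rows[y][x] in total form
-- (the .getD defaults are only reached outside Pre_, where Python raises IndexError)
def bfsLoopA (rows : List (List String)) : Nat → Int → PySem.Set (Int × Int) → List (Int × Int) → Int
  | 0, result, _, _ => result
  | fuel + 1, result, checked, queued =>
    match queued with
    | [] => result
    | check :: rest =>
      if PySem.Set.contains checked check then bfsLoopA rows fuel result checked rest
      else
        let checked2 := PySem.Set.add checked check
        let y := check.1
        let x := check.2
        let grid_value := (PySem.List.pyGet? ((PySem.List.pyGet? rows y).getD []) x).getD ""
        let new_positions : List (Int × Int) :=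
          if grid_value = "." then [(y + 1, x)]
          else if grid_value = "^" then [(y + 1, x - 1), (y + 1, x + 1)]
          else []
        let result2 := if grid_value = "^" then result + 1 else result
        let queued2 := new_positions.foldl (fun q pos =>
          if pos.1 < 0 ∨ pos.1 ≥ (rows.length : Int) ∨ pos.2 < 0 ∨ pos.2 ≥ ((rows.headD []).length : Int)
          then q
          else if PySem.Set.contains checked2 pos then q else q ++ [pos]) rest
        bfsLoopA rows fuel result2 checked2 queued2

def get_n_splits (rows : List (List String)) : Int :=
  match get_start_pos rows with
  | none => 0   -- Python raises ValueError here; excluded by Pre_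
  | some start => bfsLoopA rows (pvFuelA rows) 0 PySem.Set.empty [start]

-- ===== PORT B =====
-- the enumerate-and-break search for the start position
def bStart : List (List String) → Int → Option (Int × Int)
  | [], _ => none
  | row :: rest, r =>
    if row.contains "S" then (PySem.List.index? row "S").map (fun c => (r + 1, (c : Int)))
    else bStart rest (r + 1)

-- one iteration of 'for row in rows[start_row:]' per list element, frontier = set of active columns
def sweepB (width : Int) : List (List String) → List Int → Int → Int
  | [], _, count => count
  | row :: rest, frontier, count =>
    let step : Int × PySem.Set Int := frontier.foldl (fun acc x =>
      let c := (PySem.List.pyGet? row x).getD ""   -- row[x]; default only reached outside Pre_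
      if c = "^" then (acc.1 + 1, PySem.Set.add (PySem.Set.add acc.2 (x - 1)) (x + 1))
      else if c = "." then (acc.1, PySem.Set.add acc.2 x)
      else acc) (count, PySem.Set.empty)
    sweepB width rest ((step.2).filter (fun x => decide (0 ≤ x ∧ x < width))) step.1

def get_n_splits_alt (rows : List (List String)) : Int :=
  match bStart rows 0 with
  | none => 0   -- Source B raises ValueError here; excluded by Pre_
  | some start =>
    let width : Int := ((rows.headD []).length : Int)   -- len(rows[0]); rows ≠ [] whenever a start was found
    sweepB width (PySem.List.slice rows (some start.1) none) [start.2] 0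

-- ===== PRECONDITION & SPEC =====
-- Pre_ excludes: grids without an 'S' (A raises ValueError), grids whose first 'S' sits in the
-- bottom row (A raises IndexError), and non-rectangular grids (A raises IndexError on most of
-- them and its value on the remaining ones depends on which short row the traversal happens to
-- touch; both programs agree on the cited ragged example).
def Pre_get_n_splits (rows : List (List String)) : Prop :=
  (∀ row ∈ rows, row.length = (rows.headD []).length) ∧
  rows.findIdx (fun row => row.contains "S") + 1 < rows.length
instance (rows : List (List String)) : Decidable (Pre_get_n_splits rows) := by
  unfold Pre_get_n_splits; infer_instance

def pvWitness_get_n_splits : List (List String) := [[".", "S"], ["^", "."], [".", "."]]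

def Spec_get_n_splits (rows : List (List String)) (out : Int) : Prop := out = get_n_splits_alt rows
instance (rows : List (List String)) (out : Int) : Decidable (Spec_get_n_splits rows out) := by unfold Spec_get_n_splits; infer_instance

-- ===== CLAIM (what is proved, stated in full; the proofs are below) =====
def Claim_equal_get_n_splits : Prop := ∀ (rows : List (List String)), Dom_get_n_splits rows → Pre_get_n_splits rows → Spec_get_n_splits rows (get_n_splits rows)

-- ===== LEMMAS AND PROOFS =====

-- ---- proof-side abbreviations for A's loop body ----

def cellAt (rows : List (List String)) (y x : Int) : String :=
  (PySem.List.pyGet? ((PySem.List.pyGet? rows y).getD []) x).getD ""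

def cellB (row : List String) (x : Int) : String := (PySem.List.pyGet? row x).getD ""

def rawNew (cell : String) (y x : Int) : List (Int × Int) :=
  if cell = "." then [(y + 1, x)]
  else if cell = "^" then [(y + 1, x - 1), (y + 1, x + 1)]
  else []

abbrev outOfB (rows : List (List String)) (pos : Int × Int) : Prop :=
  pos.1 < 0 ∨ pos.1 ≥ (rows.length : Int) ∨ pos.2 < 0 ∨ pos.2 ≥ ((rows.headD []).length : Int)

def stepA (rows : List (List String)) (st : PySem.Set (Int × Int) × Int × List (Int × Int))
    (p : Int × Int) : PySem.Set (Int × Int) × Int × List (Int × Int) :=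
  if PySem.Set.contains st.1 p = true then st
  else
    (PySem.Set.add st.1 p,
     (if cellAt rows p.1 p.2 = "^" then st.2.1 + 1 else st.2.1),
     st.2.2 ++ (rawNew (cellAt rows p.1 p.2) p.1 p.2).filter
       (fun pos => decide (¬ outOfB rows pos ∧ ¬ (PySem.Set.contains (PySem.Set.add st.1 p) pos = true))))

def pushListA (rows : List (List String)) (y x : Int) : List (Int × Int) :=
  (rawNew (cellAt rows y x) y x).filter (fun pos => decide (¬ outOfB rows pos))

def childList (cell : String) (x : Int) : List Int :=
  if cell = "." then [x] else if cell = "^" then [x - 1, x + 1] else []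

def childCols (row : List String) (x : Int) : List Int :=
  if cellB row x = "^" then [x - 1, x + 1] else if cellB row x = "." then [x] else []

-- ---- small structural facts ----

theorem bfsLoopA_nil (rows : List (List String)) (fuel : Nat) (result : Int)
    (checked : PySem.Set (Int × Int)) : bfsLoopA rows fuel result checked [] = result := by
  cases fuel <;> simp [bfsLoopA]

theorem rawNew_fst (cell : String) (y x : Int) : ∀ pos ∈ rawNew cell y x, pos.1 = y + 1 := by
  intro pos h
  unfold rawNew at h
  split_ifs at h
  · simp at h; simp [h]
  · rcases List.mem_pair.mp h with h | h <;> simp [h]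
  · simp at h

theorem rawNew_eq_map (cell : String) (y x : Int) :
    rawNew cell y x = (childList cell x).map (fun c => (y + 1, c)) := by
  unfold rawNew childList; split_ifs <;> simp

theorem childList_eq (row : List String) (x : Int) :
    childList (cellB row x) x = childCols row x := by
  unfold childList childCols
  split_ifs with h1 h2 <;> simp_all

-- dedup commutes with filter
theorem dedup_filter {α : Type} [BEq α] [LawfulBEq α] (p : α → Bool) (l : List α) :
    PySem.List.dedup (l.filter p) = (PySem.List.dedup l).filter p := by
  induction l with
  | nil => rfl
  | cons x xs ih =>
    by_cases hx : p x = true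
    · rw [show (x :: xs).filter p = x :: xs.filter p by simp [List.filter_cons, hx]]
      rw [show PySem.List.dedup (x :: xs.filter p) = x :: PySem.Set.discard (PySem.List.dedup (xs.filter p)) x from
        PySem.Set.ofList_cons x (xs.filter p)]
      rw [show PySem.List.dedup (x :: xs) = x :: PySem.Set.discard (PySem.List.dedup xs) x from
        PySem.Set.ofList_cons x xs]
      rw [ih]
      simp only [PySem.Set.discard, List.filter_filter, List.filter_cons, hx]
      exact congrArg (x :: ·) (List.filter_congr (fun a _ => by rw [Bool.and_comm]))
    · rw [show (x :: xs).filter p = xs.filter p by simp [List.filter_cons, hx]]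
      rw [ih]
      rw [show PySem.List.dedup (x :: xs) = x :: PySem.Set.discard (PySem.List.dedup xs) x from
        PySem.Set.ofList_cons x xs]
      simp only [PySem.Set.discard, List.filter_filter, List.filter_cons, hx]
      exact List.filter_congr (fun a _ => by
        by_cases hpa : p a = true
        · have : (a == x) = false := by
            refine beq_eq_false_iff_ne.mpr ?_
            intro e; rw [e] at hpa; exact hx hpa
          simp [hpa, this]
        · simp [Bool.eq_false_iff.mpr hpa])

theorem dedup_cons_not_mem {α : Type} [BEq α] [LawfulBEq α] (x : α) (c seen : List α)
    (h : x ∉ seen) :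
    (PySem.List.dedup (x :: c)).filter (fun z => decide (z ∉ seen))
      = x :: (PySem.List.dedup c).filter (fun z => decide (z ∉ x :: seen)) := by
  rw [show PySem.List.dedup (x :: c) = x :: PySem.Set.discard (PySem.List.dedup c) x from
    PySem.Set.ofList_cons x c]
  simp only [List.filter_cons, decide_eq_true_eq, h, not_false_iff, if_pos, PySem.Set.discard,
    List.filter_filter]
  refine congrArg (x :: ·) (List.filter_congr (fun a _ => ?_))
  by_cases hax : a = x
  · simp [hax]
  · simp [hax, beq_eq_false_iff_ne.mpr hax]

theorem dedup_cons_mem {α : Type} [BEq α] [LawfulBEq α] (x : α) (c seen : List α)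
    (h : x ∈ seen) :
    (PySem.List.dedup (x :: c)).filter (fun z => decide (z ∉ seen))
      = (PySem.List.dedup c).filter (fun z => decide (z ∉ seen)) := by
  rw [show PySem.List.dedup (x :: c) = x :: PySem.Set.discard (PySem.List.dedup c) x from
    PySem.Set.ofList_cons x c]
  rw [List.filter_cons]
  simp only [decide_eq_true_eq, h, not_true, if_neg (by simp [h] : ¬ decide (x ∉ seen) = true)]
  simp only [PySem.Set.discard, List.filter_filter]
  refine List.filter_congr (fun a _ => ?_)
  by_cases ha : a ∈ seen
  · simp [ha]
  · have : (a == x) = false := beq_eq_false_iff_ne.mpr (fun e => ha (e ▸ h))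
    simp [ha, this]

-- ---- draining one row of A's queue is a fold of stepA ----

theorem bfs_drain (rows : List (List String)) (pend : List (Int × Int)) :
    ∀ (next : List (Int × Int)) (checked : PySem.Set (Int × Int)) (result : Int) (fuel : Nat),
      pend.length ≤ fuel →
      bfsLoopA rows fuel result checked (pend ++ next) =
        bfsLoopA rows (fuel - pend.length)
          (pend.foldl (stepA rows) (checked, result, next)).2.1
          (pend.foldl (stepA rows) (checked, result, next)).1
          (pend.foldl (stepA rows) (checked, result, next)).2.2 := by
  induction pend with
  | nil => intro next checked result fuel _; simp
  | cons p t ih =>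
    intro next checked result fuel hfuel
    obtain ⟨f, rfl⟩ : ∃ f, fuel = f + 1 := ⟨fuel - 1, by simp only [List.length_cons] at hfuel; omega⟩
    have hlen : t.length ≤ f := by simp only [List.length_cons] at hfuel; omega
    have hfsub : f + 1 - (p :: t).length = f - t.length := by
      simp only [List.length_cons]; omega
    rw [List.cons_append]
    show bfsLoopA rows (f + 1) result checked (p :: (t ++ next)) = _
    by_cases hc : PySem.Set.contains checked p = true
    · have h1 : bfsLoopA rows (f + 1) result checked (p :: (t ++ next))
          = bfsLoopA rows f result checked (t ++ next) := by
        simp only [bfsLoopA, hc, if_true]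
      have h2 : stepA rows (checked, result, next) p = (checked, result, next) := by
        unfold stepA; rw [if_pos hc]
      rw [h1, ih next checked result f hlen, List.foldl_cons, h2, hfsub]
    · have hbody : (fun (q : List (Int × Int)) pos =>
            if pos.1 < 0 ∨ pos.1 ≥ (rows.length : Int) ∨ pos.2 < 0 ∨ pos.2 ≥ ((rows.headD []).length : Int)
            then q
            else if PySem.Set.contains (PySem.Set.add checked p) pos then q else q ++ [pos])
          = (fun q pos =>
            if (¬ outOfB rows pos ∧ ¬ (PySem.Set.contains (PySem.Set.add checked p) pos = true))
            then q ++ [pos] else q) := by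
        funext q pos; unfold outOfB; split_ifs <;> tauto
    
      have hstep : bfsLoopA rows (f + 1) result checked (p :: (t ++ next))
          = bfsLoopA rows f
              (if cellAt rows p.1 p.2 = "^" then result + 1 else result)
              (PySem.Set.add checked p)
              ((rawNew (cellAt rows p.1 p.2) p.1 p.2).foldl (fun q pos =>
                if pos.1 < 0 ∨ pos.1 ≥ (rows.length : Int) ∨ pos.2 < 0 ∨ pos.2 ≥ ((rows.headD []).length : Int)
                then q
                else if PySem.Set.contains (PySem.Set.add checked p) pos then q else q ++ [pos])
                (t ++ next)) := by
        simp only [bfsLoopA, hc, Bool.false_eq_true, if_false, cellAt, rawNew]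
        rfl
      rw [hstep, hbody, PySem.List.foldl_append_ite_eq_filter, List.append_assoc]
      rw [ih (next ++ _) (PySem.Set.add checked p) _ f hlen]
      have h2 : stepA rows (checked, result, next) p
          = (PySem.Set.add checked p,
             (if cellAt rows p.1 p.2 = "^" then result + 1 else result),
             next ++ (rawNew (cellAt rows p.1 p.2) p.1 p.2).filter
               (fun pos => decide (¬ outOfB rows pos ∧ ¬ (PySem.Set.contains (PySem.Set.add checked p) pos = true)))) := by
        unfold stepA; rw [if_neg hc]
      rw [List.foldl_cons, h2, hfsub]

-- ---- A's row fold, started with no row-y entries recorded, emits the deduplicated columns ----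

theorem processRow_spec (rows : List (List String)) (y : Int) (cols : List Int) :
    ∀ (seen : List Int) (checked : PySem.Set (Int × Int)),
      (∀ x : Int, ((y, x) ∈ checked ↔ x ∈ seen)) →
      (∀ p ∈ checked, p.1 ≤ y) →
      ∀ (result : Int) (next : List (Int × Int)),
      (cols.map (fun x => ((y, x) : Int × Int))).foldl (stepA rows) (checked, result, next) =
        (checked ++ ((PySem.List.dedup cols).filter (fun z => decide (z ∉ seen))).map (fun x => ((y, x) : Int × Int)),
         result + (((PySem.List.dedup cols).filter (fun z => decide (z ∉ seen))).countP
            (fun x => decide (cellAt rows y x = "^")) : Int),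
         next ++ ((PySem.List.dedup cols).filter (fun z => decide (z ∉ seen))).flatMap
            (fun x => pushListA rows y x)) := by
  induction cols with
  | nil => intro seen checked hmem hle result next; simp [PySem.List.dedup, PySem.Set.ofList]
  | cons x c ih =>
    intro seen checked hmem hle result next
    rw [List.map_cons, List.foldl_cons]
    by_cases hx : x ∈ seen
    · have hcont : PySem.Set.contains checked (y, x) = true :=
        (PySem.Set.contains_iff _ _).mpr ((hmem x).mpr hx)
      have hstep : stepA rows (checked, result, next) (y, x) = (checked, result, next) := by
        unfold stepA; rw [if_pos hcont]
      rw [hstep, ih seen checked hmem hle result next, dedup_cons_mem x c seen hx]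
    · have hnot : ((y, x) : Int × Int) ∉ checked := fun h => hx ((hmem x).mp h)
      have hcont : PySem.Set.contains checked (y, x) = false :=
        Bool.eq_false_iff.mpr (fun hT => hnot ((PySem.Set.contains_iff _ _).mp hT))
      have haddmem : ∀ pos ∈ rawNew (cellAt rows y x) y x,
          PySem.Set.contains (PySem.Set.add checked (y, x)) pos = false := by
        intro pos hpos
        refine Bool.eq_false_iff.mpr (fun hT => ?_)
        have hfst : pos.1 = y + 1 := rawNew_fst _ _ _ pos hpos
        rcases (PySem.Set.mem_add _ _ _).mp ((PySem.Set.contains_iff _ _).mp hT) with hmem2 | hEq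
        · have := hle pos hmem2; omega
        · rw [hEq] at hfst; simp at hfst
      have hstep : stepA rows (checked, result, next) (y, x)
          = (checked ++ [((y, x) : Int × Int)],
             (if cellAt rows y x = "^" then result + 1 else result),
             next ++ pushListA rows y x) := by
        simp only [stepA, hcont, Bool.false_eq_true, if_false]
        have hfil : (rawNew (cellAt rows y x) y x).filter
              (fun pos => decide (¬ outOfB rows pos ∧
                ¬ (PySem.Set.contains (PySem.Set.add checked (y, x)) pos = true)))
            = pushListA rows y x := by
          refine List.filter_congr (fun pos hpos => ?_)
          rw [haddmem pos hpos]
          simp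
        have hadd : PySem.Set.add checked ((y, x) : Int × Int) = checked ++ [(y, x)] :=
          PySem.Set.add_of_not_mem hnot
        rw [hfil, hadd]
      have hmem' : ∀ z : Int, ((y, z) ∈ checked ++ [((y, x) : Int × Int)] ↔ z ∈ x :: seen) := by
        intro z
        simp only [List.mem_append, Prod.mk.injEq, List.mem_cons, hmem z,
          true_and]
        tauto
      have hle' : ∀ p ∈ checked ++ [((y, x) : Int × Int)], p.1 ≤ y := by
        intro p hp
        rcases List.mem_append.mp hp with h | h
        · exact hle p h
        · simp at h; rw [h]
      rw [hstep, ih (x :: seen) (checked ++ [(y, x)]) hmem' hle'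
        (if cellAt rows y x = "^" then result + 1 else result) (next ++ pushListA rows y x)]
      rw [dedup_cons_not_mem x c seen hx]
      simp only [List.map_cons, List.countP_cons, List.flatMap_cons, Prod.mk.injEq]
      refine ⟨by simp, ?_, by rw [List.append_assoc]⟩
      by_cases hcar : cellAt rows y x = "^"
      · simp [hcar]; ring
      · simp [hcar]

-- ---- B's per-row fold computes the count and the child-column set ----

theorem rowB_spec (row : List String) (F : List Int) :
    ∀ (count : Int) (s : PySem.Set Int),
      F.foldl (fun acc x =>
        let c := (PySem.List.pyGet? row x).getD ""
        if c = "^" then (acc.1 + 1, PySem.Set.add (PySem.Set.add acc.2 (x - 1)) (x + 1))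
        else if c = "." then (acc.1, PySem.Set.add acc.2 x)
        else acc) (count, s) =
      (count + (F.countP (fun x => decide (cellB row x = "^")) : Int),
       PySem.Set.update s (F.flatMap (childCols row))) := by
  induction F with
  | nil => intro count s; simp [PySem.Set.update]
  | cons x t ih =>
    intro count s
    rw [List.foldl_cons]
    show t.foldl _
        (if cellB row x = "^" then (count + 1, PySem.Set.add (PySem.Set.add s (x - 1)) (x + 1))
         else if cellB row x = "." then (count, PySem.Set.add s x) else (count, s)) = _
    by_cases h1 : cellB row x = "^"
    · rw [if_pos h1, ih _ _]
      have h2 : childCols row x = [x - 1, x + 1] := by rw [childCols, if_pos h1]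
      simp only [List.flatMap_cons, h2, List.countP_cons, h1, decide_true, if_pos,
        PySem.Set.update, List.foldl_append, List.foldl_cons, List.foldl_nil, Prod.mk.injEq]
      constructor
      · push_cast; ring
      · trivial
    · rw [if_neg h1]
      by_cases h2 : cellB row x = "."
      · rw [if_pos h2, ih _ _]
        have h3 : childCols row x = [x] := by rw [childCols, if_neg h1, if_pos h2]
        simp only [List.flatMap_cons, h3, List.countP_cons, PySem.Set.update,
          List.foldl_append, List.foldl_cons, List.foldl_nil, Prod.mk.injEq]
        constructor
        · simp [h1]
        · trivial
      · rw [if_neg h2, ih _ _]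
        have h3 : childCols row x = [] := by rw [childCols, if_neg h1, if_neg h2]
        simp only [List.flatMap_cons, h3, List.countP_cons, PySem.Set.update,
          List.foldl_append, List.foldl_nil, List.nil_append, Prod.mk.injEq]
        constructor
        · simp [h1]
        · trivial

-- bounds facts about A's filtered pushes
theorem pushListA_mem (rows : List (List String)) (y x : Int) :
    ∀ p ∈ pushListA rows y x, p.1 = y + 1 ∧ 0 ≤ p.2 ∧ p.2 < ((rows.headD []).length : Int) := by
  intro p hp
  simp only [pushListA, List.mem_filter] at hp
  obtain ⟨hraw, hdec⟩ := hp
  have h1 := rawNew_fst _ _ _ p hraw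
  have h2 := of_decide_eq_true hdec
  unfold outOfB at h2
  push Not at h2
  exact ⟨h1, h2.2.2.1, h2.2.2.2⟩

theorem pushListA_empty (rows : List (List String)) (y x : Int)
    (h : (rows.length : Int) ≤ y + 1) : pushListA rows y x = [] := by
  unfold pushListA
  apply List.filter_eq_nil_iff.mpr
  intro p hp
  have h1 := rawNew_fst _ _ _ p hp
  simp only [decide_eq_true_eq, not_not]
  unfold outOfB
  right; left; omega

theorem pushListA_len (rows : List (List String)) (y x : Int) :
    (pushListA rows y x).length ≤ 2 := by
  unfold pushListA
  refine le_trans (List.length_filter_le _ _) ?_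
  unfold rawNew
  split_ifs <;> simp

-- ---- the main induction: BFS = row sweep, row by row ----

theorem main_aux (rows : List (List String)) (W : Nat) (hW : (rows.headD []).length = W)
    (hrect : ∀ row ∈ rows, row.length = W) :
    ∀ (rest : List (List String)) (y : Nat), rows.drop y = rest →
    ∀ (pend : List (Int × Int)), (∀ p ∈ pend, p.1 = (y : Int) ∧ 0 ≤ p.2 ∧ p.2 < (W : Int)) →
    ∀ (frontier : List Int), (rest ≠ [] → frontier = PySem.List.dedup (pend.map Prod.snd)) →
    (rest = [] → pend = []) →
    ∀ (checked : PySem.Set (Int × Int)), (∀ p ∈ checked, p.1 < (y : Int)) →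
    ∀ (result : Int) (fuel : Nat), pend.length * (2 ^ (rest.length + 1) - 1) ≤ fuel →
    bfsLoopA rows fuel result checked pend = sweepB (W : Int) rest frontier result := by
  intro rest
  induction rest with
  | nil =>
    intro y hdrop pend hp frontier hf hre checked hchk result fuel hfuel
    rw [hre rfl, bfsLoopA_nil]
    rfl
  | cons row rest' ih =>
    intro y hdrop pend hp frontier hf hre checked hchk result fuel hfuel
    -- the row at index y, and basic index facts
    have hrow0 : rows[y]? = some row := by
      have h := List.getElem?_drop (xs := rows) (i := y) (j := 0)
      rw [hdrop] at h
      simpa using h.symm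
    obtain ⟨hylt, -⟩ := List.getElem?_eq_some_iff.mp hrow0
    have hdrop' : rows.drop (y + 1) = rest' := by
      have h : rows.drop (y + 1) = (rows.drop y).drop 1 := by rw [List.drop_drop]
      rw [h, hdrop]; rfl
    have hrowmem : row ∈ rows := List.drop_subset y rows (hdrop ▸ List.mem_cons_self ..)
    have hrowlen : row.length = W := hrect row hrowmem
    have hcell : ∀ x : Int, cellAt rows (y : Int) x = cellB row x := by
      intro x; unfold cellAt cellB; rw [PySem.List.pyGet?_natCast, hrow0]; rfl
    have hfr : frontier = PySem.List.dedup (pend.map Prod.snd) := hf (by simp)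
    -- 1 ≤ the fuel factor
    have hA1 : (1 : Nat) ≤ 2 ^ ((row :: rest').length + 1) - 1 := by
      have := Nat.one_lt_two_pow_iff.mpr (by simp : (row :: rest').length + 1 ≠ 0)
      omega
    have hlenle : pend.length ≤ fuel :=
      le_trans (Nat.le_mul_of_pos_right pend.length (by omega)) hfuel
    -- drain row y of A's queue
    conv_lhs => rw [← List.append_nil pend]
    rw [bfs_drain rows pend [] checked result fuel hlenle]
    have hpend_eq : pend = (pend.map Prod.snd).map (fun x => ((y : Int), x)) := by
      rw [List.map_map]
      symm
      have h : pend.map ((fun x => (((y : Int), x) : Int × Int)) ∘ Prod.snd) = pend.map id :=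
        List.map_congr_left (fun p hpm => by
          obtain ⟨h1, -, -⟩ := hp p hpm
          simp only [Function.comp_apply, id_eq, ← h1])
      rw [h, List.map_id]
    have hmem0 : ∀ x : Int, (((y : Int), x) ∈ checked ↔ x ∈ ([] : List Int)) := by
      intro x
      constructor
      · intro h; have := hchk _ h; simp at this
      · intro h; simp at h
    have hle0 : ∀ p ∈ checked, p.1 ≤ (y : Int) := fun p h => le_of_lt (hchk p h)
    conv_lhs => rw [hpend_eq]
    rw [processRow_spec rows (y : Int) (pend.map Prod.snd) [] checked hmem0 hle0 result []]
    simp only [List.not_mem_nil, not_false_eq_true, decide_true, List.filter_true,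
      List.nil_append]
    -- unfold one step of B's sweep
    rw [hfr]
    show _ = sweepB (W : Int) (row :: rest') (PySem.List.dedup (pend.map Prod.snd)) result
    rw [sweepB, rowB_spec row (PySem.List.dedup (pend.map Prod.snd)) result PySem.Set.empty]
    -- the two counts agree
    have hcnt : (PySem.List.dedup (pend.map Prod.snd)).countP
          (fun x => decide (cellAt rows (y : Int) x = "^"))
        = (PySem.List.dedup (pend.map Prod.snd)).countP
          (fun x => decide (cellB row x = "^")) :=
      List.countP_congr (fun x _ => by rw [hcell x])
    rw [hcnt]
    -- invariants for the next row
    refine ih (y + 1) hdrop' _ ?_ _ ?_ ?_ _ ?_ _ _ ?_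
    · -- hp'
      intro p hpm
      obtain ⟨x, -, hpx⟩ := List.mem_flatMap.mp hpm
      obtain ⟨h1, h2, h3⟩ := pushListA_mem rows (y : Int) x p hpx
      rw [hW] at h3
      refine ⟨by rw [h1]; push_cast; ring, h2, h3⟩
    · -- hf'
      intro hne
      have hlt' : y + 1 < rows.length := by
        rcases Nat.lt_or_ge (y + 1) rows.length with h | h
        · exact h
        · exact absurd (List.drop_eq_nil_iff.mpr h) (hdrop' ▸ hne ∘ Eq.symm ∘ Eq.symm)
      have hpush : ∀ x : Int, pushListA rows (y : Int) x
          = ((childCols row x).filter (fun c => decide (0 ≤ c ∧ c < (W : Int)))).map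
              (fun c => (((y : Int) + 1, c) : Int × Int)) := by
        intro x
        unfold pushListA
        rw [hcell x, rawNew_eq_map, childList_eq, List.filter_map]
        refine congrArg (List.map _) (List.filter_congr (fun c _ => ?_))
        simp only [Function.comp_apply]
        refine decide_eq_decide.mpr ?_
        unfold outOfB
        rw [hW]
        constructor
        · intro h; push Not at h; exact ⟨h.2.2.1, h.2.2.2⟩
        · intro h; push Not; refine ⟨by omega, by omega, h.1, h.2⟩
      calc (PySem.Set.ofList ((PySem.List.dedup (pend.map Prod.snd)).flatMap
              (childCols row))).filter (fun x => decide (0 ≤ x ∧ x < (W : Int)))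
          = PySem.List.dedup ((((PySem.List.dedup (pend.map Prod.snd)).flatMap
              (childCols row))).filter (fun x => decide (0 ≤ x ∧ x < (W : Int)))) := by
            rw [dedup_filter]; rfl
        _ = PySem.List.dedup (((PySem.List.dedup (pend.map Prod.snd)).flatMap
              (fun x => (childCols row x).filter (fun c => decide (0 ≤ c ∧ c < (W : Int))))))
            := by rw [List.filter_flatMap]
        _ = PySem.List.dedup ((((PySem.List.dedup (pend.map Prod.snd)).flatMap
              (fun x => pushListA rows (y : Int) x))).map Prod.snd) := by
            refine congrArg PySem.List.dedup ?_
            rw [List.map_flatMap]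
            refine List.flatMap_congr (fun x _ => ?_)
            rw [hpush x, List.map_map]
            simp
    · -- hre'
      intro hnil
      have hge : rows.length ≤ y + 1 := List.drop_eq_nil_iff.mp (hdrop'.trans hnil)
      refine List.flatMap_eq_nil_iff.mpr (fun x _ => pushListA_empty rows (y : Int) x (by push_cast; omega))
    · -- hchk'
      intro p hpm
      rcases List.mem_append.mp hpm with h | h
      · have := hchk p h; push_cast; omega
      · obtain ⟨x, -, hpx⟩ := List.mem_map.mp h
        rw [← hpx]; simp
    · -- fuel
      have hlenF : (PySem.List.dedup (pend.map Prod.snd)).length ≤ pend.length := by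
        refine le_trans (PySem.Set.length_ofList_le _) (by rw [List.length_map])
      have hq : ((PySem.List.dedup (pend.map Prod.snd)).flatMap
            (fun x => pushListA rows (y : Int) x)).length
          ≤ 2 * pend.length := by
        rw [List.length_flatMap]
        refine le_trans (List.sum_le_card_nsmul _ 2 (fun n hn => ?_)) (by
          simp only [smul_eq_mul, List.length_map]
          omega)
        obtain ⟨x, -, hx⟩ := List.mem_map.mp hn
        rw [← hx]; exact pushListA_len rows (y : Int) x
      simp only [List.length_cons] at hfuel
      simp only [List.length_map]
      set A := 2 ^ (rest'.length + 1) with hAdef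
      have hA : (1 : Nat) ≤ A := Nat.one_le_two_pow
      have hpow : 2 ^ (rest'.length + 1 + 1) = 2 * A := by rw [pow_succ]; ring
      rw [hpow] at hfuel
      have e3 : ((PySem.List.dedup (pend.map Prod.snd)).flatMap
            (fun x => pushListA rows (y : Int) x)).length * (A - 1) + pend.length
          ≤ pend.length * (2 * A - 1) := by
        have h1 : ((PySem.List.dedup (pend.map Prod.snd)).flatMap
              (fun x => pushListA rows (y : Int) x)).length * (A - 1)
            ≤ 2 * pend.length * (A - 1) := Nat.mul_le_mul_right _ hq
        have h3 : 2 * A - 1 = 2 * (A - 1) + 1 := by omega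
        have h2 : 2 * pend.length * (A - 1) + pend.length = pend.length * (2 * A - 1) := by
          rw [h3]; ring
        omega
      omega

-- ---- start-position search: A's index scan = B's structural scan ----

theorem find_S (row : List String) : ∀ (g : Nat → Int × Int),
    (List.range row.length).findSome?
        (fun j => if row[j]? = some "S" then some (g j) else none)
      = (PySem.List.index? row "S").map g := by
  induction row with
  | nil => intro g; simp
  | cons a t ih =>
    intro g
    rw [List.length_cons, List.range_succ_eq_map, List.findSome?_cons, List.findSome?_map]
    by_cases h : a = "S"
    · subst h
      rw [PySem.List.index?_cons_self]
      simp
    · have h0 : (a :: t)[0]? = some a := rfl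
      rw [h0]
      rw [if_neg (by simp [h] : ¬ (some a = some "S"))]
      rw [show ((fun j => if (a :: t)[j]? = some "S" then some (g j) else none) ∘ Nat.succ)
            = (fun j => if t[j]? = some "S" then some ((g ∘ Nat.succ) j) else none) from by
          funext j; simp]
      rw [ih (g ∘ Nat.succ), PySem.List.index?_cons_of_ne t (fun e => h e)]
      rw [Option.map_map]

theorem start_scan (rows : List (List String)) (W : Nat)
    (hrect : ∀ row ∈ rows, row.length = W) : ∀ (a : Int),
    (List.range rows.length).findSome? (fun (i : Nat) =>
        (List.range W).findSome? (fun (j : Nat) =>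
          if (rows[i]?.getD [])[j]? = some "S" then some (a + (i : Int) + 1, (j : Int)) else none))
      = bStart rows a := by
  induction rows with
  | nil => intro a; simp [bStart]
  | cons r t ih =>
    intro a
    have hr : r.length = W := hrect r (List.mem_cons_self ..)
    have ht : ∀ row ∈ t, row.length = W := fun row h => hrect row (List.mem_cons_of_mem _ h)
    rw [List.length_cons, List.range_succ_eq_map, List.findSome?_cons, List.findSome?_map]
    have h0 : ((r :: t)[0]?).getD [] = r := rfl
    rw [h0]
    have hhead : (List.range W).findSome? (fun (j : Nat) =>
          if r[j]? = some "S" then some (a + ((0 : Nat) : Int) + 1, (j : Int)) else none)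
        = (PySem.List.index? r "S").map (fun (j : Nat) => ((a + ((0 : Nat) : Int) + 1 : Int), (j : Int))) := by
      rw [← hr]
      exact find_S r (fun (j : Nat) => ((a + ((0 : Nat) : Int) + 1 : Int), (j : Int)))
    rw [hhead]
    by_cases hS : r.contains "S" = true
    · have hmem : "S" ∈ r := by simpa using hS
      obtain ⟨k, hk⟩ := Option.isSome_iff_exists.mp ((PySem.List.index?_isSome_iff r "S").mpr hmem)
      rw [bStart, if_pos hS, hk]
      simp
    · have hmem : "S" ∉ r := by simpa using hS
      have hnone : PySem.List.index? r "S" = none := (PySem.List.index?_eq_none_iff _ _).mpr hmem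
      rw [hnone]
      simp only [Option.map_none]
      have hcomp : ((fun (i : Nat) => (List.range W).findSome? (fun (j : Nat) =>
              if ((r :: t)[i]?.getD [])[j]? = some "S" then some (a + (i : Int) + 1, (j : Int)) else none))
              ∘ Nat.succ)
            = (fun (i : Nat) => (List.range W).findSome? (fun (j : Nat) =>
              if (t[i]?.getD [])[j]? = some "S" then some ((a + 1) + (i : Int) + 1, (j : Int)) else none)) := by
        funext i
        simp only [Function.comp_apply]
        refine congrArg (fun f => List.findSome? f (List.range W)) (funext fun j => ?_)
        have hidx : ((r :: t)[Nat.succ i]?) = t[i]? := rfl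
        rw [hidx]
        have harith : (a + ((Nat.succ i : Nat) : Int) + 1) = (a + 1 + (i : Int) + 1) := by
          push_cast; ring
        rw [harith]
      rw [hcomp, ih ht (a + 1)]
      rw [bStart, if_neg hS]

theorem get_start_pos_eq (rows : List (List String)) (W : Nat)
    (hW : (rows.headD []).length = W) (hrect : ∀ row ∈ rows, row.length = W) :
    get_start_pos rows = bStart rows 0 := by
  have h1 : get_start_pos rows
      = List.findSome? (fun (i : Nat) => (List.range W).findSome? (fun (j : Nat) =>
          if ((rows[i]?.getD [])[j]? = some "S") then some (((0 : Int) + (i : Int) + 1 : Int), (j : Int)) else none))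
          (List.range rows.length) := by
    unfold get_start_pos
    rw [hW, PySem.List.pyRange_zero_natCast rows.length, List.findSome?_map]
    refine congrArg (fun f => List.findSome? f (List.range rows.length)) (funext fun i => ?_)
    simp only [Function.comp_apply]
    rw [PySem.List.pyRange_zero_natCast W, List.findSome?_map]
    refine congrArg (fun f => List.findSome? f (List.range W)) (funext fun j => ?_)
    simp only [Function.comp_apply, PySem.List.pyGet?_natCast]
    refine if_congr Iff.rfl ?_ rfl
    simp
  rw [h1]
  exact start_scan rows W hrect 0

theorem bStart_some (rows : List (List String)) :
    ∀ (a : Int), rows.findIdx (fun row => row.contains "S") < rows.length →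
    ∃ c : Nat, bStart rows a
        = some (a + (rows.findIdx (fun row => row.contains "S") : Int) + 1, (c : Int))
      ∧ c < (rows.getD (rows.findIdx (fun row => row.contains "S")) []).length := by
  induction rows with
  | nil => intro a h; simp at h
  | cons r t ih =>
    intro a h
    by_cases hS : r.contains "S" = true
    · have hmem : "S" ∈ r := by simpa using hS
      have hfi : (r :: t).findIdx (fun row => row.contains "S") = 0 := by
        rw [List.findIdx_cons]; simp [hmem]
      obtain ⟨k, hk⟩ := Option.isSome_iff_exists.mp ((PySem.List.index?_isSome_iff r "S").mpr hmem)
      obtain ⟨hklt, -⟩ := PySem.List.getElem_of_index?_eq_some hk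
      refine ⟨k, ?_, ?_⟩
      · rw [bStart, if_pos hS, hk, hfi]; simp
      · rw [hfi]; simpa using hklt
    · have hfi : (r :: t).findIdx (fun row => row.contains "S")
          = t.findIdx (fun row => row.contains "S") + 1 := by
        have hmem : "S" ∉ r := by simpa using hS
        simp [List.findIdx_cons, hmem]
      rw [hfi] at h
      obtain ⟨c, hc1, hc2⟩ := ih (a + 1) (by simp only [List.length_cons] at h; omega)
      refine ⟨c, ?_, ?_⟩
      · rw [bStart, if_neg hS, hc1, hfi]
        simp only [Option.some.injEq, Prod.mk.injEq]
        constructor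
        · push_cast; ring
        · trivial
      · rw [hfi]
        simpa using hc2

-- ===== VERDICT (by name: the statement is the Claim_ definition above) =====
theorem dedup_singleton (a : Int) : PySem.List.dedup [a] = [a] := by
  rw [show PySem.List.dedup [a] = PySem.Set.ofList [a] from rfl, PySem.Set.ofList_cons]
  rfl

theorem get_n_splits_spec : Claim_equal_get_n_splits := by
  intro rows _ hpre
  obtain ⟨hrect, hidx⟩ := hpre
  unfold Spec_get_n_splits
  have hlt : rows.findIdx (fun row => row.contains "S") < rows.length := by omega
  obtain ⟨c, hbs, hclt⟩ := bStart_some rows 0 hlt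
  have hgs : get_start_pos rows = bStart rows 0 :=
    get_start_pos_eq rows ((rows.headD []).length) rfl hrect
  have hrowmem : rows.getD (rows.findIdx (fun row => row.contains "S")) [] ∈ rows := by
    rw [List.getD_eq_getElem rows [] hlt]
    exact List.getElem_mem hlt
  have hcW : c < (rows.headD []).length := by
    rw [← hrect _ hrowmem]; exact hclt
  unfold get_n_splits get_n_splits_alt
  rw [hgs, hbs]
  have hcast : ((0 : Int) + (rows.findIdx (fun row => row.contains "S") : Int) + 1)
      = ((rows.findIdx (fun row => row.contains "S") + 1 : Nat) : Int) := by push_cast; ring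
  rw [hcast]
  show bfsLoopA rows (pvFuelA rows) 0 PySem.Set.empty
        [(((rows.findIdx (fun row => row.contains "S") + 1 : Nat) : Int), (c : Int))]
      = sweepB ((rows.headD []).length : Int)
          (PySem.List.slice rows (some ((rows.findIdx (fun row => row.contains "S") + 1 : Nat) : Int)) none)
          [(c : Int)] 0
  rw [PySem.List.slice_from_natCast rows (rows.findIdx (fun row => row.contains "S") + 1)]
  refine main_aux rows ((rows.headD []).length) rfl hrect
    (rows.drop (rows.findIdx (fun row => row.contains "S") + 1))
    (rows.findIdx (fun row => row.contains "S") + 1) rfl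
    [(((rows.findIdx (fun row => row.contains "S") + 1 : Nat) : Int), (c : Int))]
    ?_ [(c : Int)] ?_ ?_ PySem.Set.empty (by intro p hp; simp at hp) 0 (pvFuelA rows) ?_
  · intro p hp
    simp only [List.mem_singleton] at hp
    rw [hp]
    exact ⟨rfl, by simp, by show ((c : Int)) < _; exact_mod_cast hcW⟩
  · intro _
    simp only [List.map_cons, List.map_nil]
    rw [dedup_singleton]
  · intro hnil
    rw [List.drop_eq_nil_iff] at hnil
    omega
  · simp only [List.length_singleton, one_mul]
    unfold pvFuelA
    have h1 : (rows.drop (rows.findIdx (fun row => row.contains "S") + 1)).length + 1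
        ≤ rows.length + 2 := by rw [List.length_drop]; omega
    have h2 : (2:Nat) ^ ((rows.drop (rows.findIdx (fun row => row.contains "S") + 1)).length + 1)
        ≤ 2 ^ (rows.length + 2) := Nat.pow_le_pow_right (by norm_num) h1
    exact le_trans (Nat.sub_le _ _) h2
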